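-- pv_equiv track=rewrite | github.com/Ivan7281/Client-server | Lab2/main.py | find_phone_number
-- ===== SOURCE A (Python) =====
-- def find_phone_number(text: str):
--     phone_numbers = []
--     text_length = len(text)
--
--     i = 0
--     while i < text_length:
--         if text[i:i+6] == "+38095" or text[i:i+6] == "+38050" or text[i:i+6] == "+38066":
--             if i+13 <= text_length:
--                 phone_numbers.append(text[i:i+13])
--             i += 13
--         else:
--             i += 1
--     return phone_numbers
-- ===== SOURCE B (Python) =====
-- import re
--
-- _PHONE_RE = re.compile(r'\+380(?:95|50|66).{7}', re.DOTALL)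
--
-- def find_phone_number(text: str):
--     return _PHONE_RE.findall(text)
-- ===== Notes on version B (the rewrite author's own statement) =====
-- stated objective: idiomatic
-- what changed: Replaced the manual index-based sliding-window while loop (slice comparisons against three prefix literals, append-and-skip-13) with a single precompiled regex scan re.findall(r'\+380(?:95|50|66).{7}', text, re.DOTALL); the C regex engine gives a large constant-factor speedup.
import Mathlib
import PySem

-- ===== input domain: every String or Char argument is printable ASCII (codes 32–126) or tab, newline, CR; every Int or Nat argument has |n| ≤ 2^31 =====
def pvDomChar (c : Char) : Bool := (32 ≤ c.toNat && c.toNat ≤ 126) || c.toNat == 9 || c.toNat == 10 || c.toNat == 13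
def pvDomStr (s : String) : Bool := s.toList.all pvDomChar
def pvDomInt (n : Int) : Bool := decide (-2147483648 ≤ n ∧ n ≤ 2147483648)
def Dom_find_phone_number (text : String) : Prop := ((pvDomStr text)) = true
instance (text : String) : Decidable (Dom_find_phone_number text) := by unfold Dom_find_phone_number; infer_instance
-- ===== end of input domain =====

-- B replaces A's manual sliding-window while loop by a single regex scan (re.findall,
-- ported as its left-to-right non-overlapping structural scan); objective: idiomatic.

-- ===== PORT A =====
-- A's while loop over index i: slice comparisons, append-and-skip-13, else advance 1.
def pvALoop (cs : List Char) (i : Nat) (acc : List String) : List String :=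
  if _h : i < cs.length then
    if PySem.List.slice cs (some (i : Int)) (some ((i + 6 : Nat) : Int)) = "+38095".toList ∨
       PySem.List.slice cs (some (i : Int)) (some ((i + 6 : Nat) : Int)) = "+38050".toList ∨
       PySem.List.slice cs (some (i : Int)) (some ((i + 6 : Nat) : Int)) = "+38066".toList then
      pvALoop cs (i + 13)
        (if i + 13 ≤ cs.length then
           acc ++ [String.ofList (PySem.List.slice cs (some (i : Int)) (some ((i + 13 : Nat) : Int)))]
         else acc)
    else
      pvALoop cs (i + 1) acc
  else acc
termination_by cs.length - i

def find_phone_number (text : String) : List String :=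
  pvALoop text.toList 0 []

-- ===== PORT B =====
-- Source B's regex r'\+380(?:95|50|66).{7}' with DOTALL: a match at a position is one of the
-- three 6-char prefixes followed by any 7 chars; findall's left-to-right non-overlapping
-- scan is this structural recursion (emit 13 chars and skip them, else step one char).
def pvMatch (cs : List Char) : Bool :=
  ("+38095".toList.isPrefixOf cs || "+38050".toList.isPrefixOf cs ||
   "+38066".toList.isPrefixOf cs) && 13 ≤ cs.length

def pvBScan (cs : List Char) : List String :=
  match cs with
  | [] => []
  | c :: rest =>
    if pvMatch (c :: rest) then
      String.ofList ((c :: rest).take 13) :: pvBScan ((c :: rest).drop 13)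
    else
      pvBScan rest
termination_by cs.length

def find_phone_number_alt (text : String) : List String :=
  pvBScan text.toList

-- ===== PRECONDITION & SPEC =====
def Spec_find_phone_number (text : String) (out : List String) : Prop := out = find_phone_number_alt text
instance (text : String) (out : List String) : Decidable (Spec_find_phone_number text out) := by unfold Spec_find_phone_number; infer_instance

-- ===== CLAIM (what is proved, stated in full; the proofs are below) =====
def Claim_equal_find_phone_number : Prop := ∀ (text : String), Dom_find_phone_number text → Spec_find_phone_number text (find_phone_number text)

-- ===== LEMMAS AND PROOFS =====

-- a slice comparison against a 6-char literal is a prefix test on the dropped tail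
lemma slice_eq_iff_prefix (cs : List Char) (i : Nat) (p : List Char) (hp : p.length = 6) :
    PySem.List.slice cs (some (i : Int)) (some ((i + 6 : Nat) : Int)) = p ↔ p <+: cs.drop i := by
  rw [PySem.List.slice_natCast]
  constructor
  · intro h
    rw [← h]
    simpa using List.take_prefix _ _
  · intro h
    simpa [hp] using (List.prefix_iff_eq_take.mp h).symm

lemma bScan_short (cs : List Char) (h : cs.length < 13) : pvBScan cs = [] := by
  induction cs with
  | nil => simp [pvBScan]
  | cons c rest ih =>
    rw [pvBScan]
    simp only [List.length_cons] at h
    have hf : pvMatch (c :: rest) = false := by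
      simp only [pvMatch, List.length_cons]
      simp
      intro _
      omega
    simp only [hf, Bool.false_eq_true, if_false]
    exact ih (by omega)

lemma aLoop_eq (cs : List Char) (i : Nat) (acc : List String) :
    pvALoop cs i acc = acc ++ pvBScan (cs.drop i) := by
  by_cases hlt : i < cs.length
  · rw [pvALoop]
    simp only [hlt, dif_pos]
    have hdrop : ∃ c rest, cs.drop i = c :: rest := by
      cases h : cs.drop i with
      | nil => exact absurd (by simpa using congrArg List.length h) (by omega)
      | cons c rest => exact ⟨c, rest, rfl⟩
    obtain ⟨c, rest, hcr⟩ := hdrop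
    by_cases hpre : PySem.List.slice cs (some (i : Int)) (some ((i + 6 : Nat) : Int)) = "+38095".toList ∨
       PySem.List.slice cs (some (i : Int)) (some ((i + 6 : Nat) : Int)) = "+38050".toList ∨
       PySem.List.slice cs (some (i : Int)) (some ((i + 6 : Nat) : Int)) = "+38066".toList
    · simp only [hpre, if_true]
      have hprefix : ("+38095".toList <+: cs.drop i) ∨ ("+38050".toList <+: cs.drop i) ∨
          ("+38066".toList <+: cs.drop i) := by
        rcases hpre with h | h | h
        · exact Or.inl ((slice_eq_iff_prefix cs i _ (by decide)).mp h)
        · exact Or.inr (Or.inl ((slice_eq_iff_prefix cs i _ (by decide)).mp h))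
        · exact Or.inr (Or.inr ((slice_eq_iff_prefix cs i _ (by decide)).mp h))
      by_cases hlen : i + 13 ≤ cs.length
      · have hmatch : pvMatch (cs.drop i) = true := by
          simp only [pvMatch, Bool.and_eq_true, Bool.or_eq_true, List.isPrefixOf_iff_prefix,
            decide_eq_true_eq]
          refine ⟨by tauto, by simp only [List.length_drop]; omega⟩
        have ih := aLoop_eq cs (i + 13)
          (acc ++ [String.ofList (PySem.List.slice cs (some (i : Int)) (some ((i + 13 : Nat) : Int)))])
        simp only [hlen, if_pos, ih]
        rw [hcr, pvBScan]
        rw [← hcr]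
        simp only [hmatch, if_true]
        have htake : PySem.List.slice cs (some (i : Int)) (some ((i + 13 : Nat) : Int))
            = (cs.drop i).take 13 := by
          rw [PySem.List.slice_natCast]
          congr 1
          omega
        have hdd : (cs.drop i).drop 13 = cs.drop (i + 13) := by
          simp [List.drop_drop]
        push_cast at htake
        simp [htake, hdd]
      · have ih := aLoop_eq cs (i + 13) acc
        simp only [hlen, if_false, ih]
        have h1 : cs.drop (i + 13) = [] := by
          apply List.drop_eq_nil_of_le; omega
        have h2 : pvBScan (cs.drop i) = [] := by
          apply bScan_short; simp [List.length_drop]; omega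
        simp [h1, h2, pvBScan]
      
    · simp only [hpre, if_false]
      have ih := aLoop_eq cs (i + 1) acc
      rw [ih, hcr, pvBScan]
      have hnm : ¬ (pvMatch (c :: rest) = true) := by
        simp only [pvMatch, Bool.and_eq_true, Bool.or_eq_true, List.isPrefixOf_iff_prefix,
          decide_eq_true_eq]
        rintro ⟨(hp | hp) | hp, -⟩
        · exact hpre (Or.inl ((slice_eq_iff_prefix cs i _ (by decide)).mpr (hcr ▸ hp)))
        · exact hpre (Or.inr (Or.inl ((slice_eq_iff_prefix cs i _ (by decide)).mpr (hcr ▸ hp))))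
        · exact hpre (Or.inr (Or.inr ((slice_eq_iff_prefix cs i _ (by decide)).mpr (hcr ▸ hp))))
      simp only [hnm]
      have : rest = cs.drop (i + 1) := by
        have := congrArg List.tail hcr
        simpa [List.tail_drop] using this.symm
      rw [this]
      simp
  · rw [pvALoop]
    simp only [hlt]
    have : cs.drop i = [] := List.drop_eq_nil_of_le (by omega)
    simp [this, pvBScan]
termination_by cs.length - i

-- ===== VERDICT (by name: the statement is the Claim_ definition above) =====
theorem find_phone_number_spec : Claim_equal_find_phone_number := by
  intro text _
  unfold Spec_find_phone_number find_phone_number find_phone_number_alt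
  simpa using aLoop_eq text.toList 0 []
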